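-- pv_equiv track=rewrite | github.com/irisyen115/leetcode | py/2500.py | deleteGreatestValue
-- ===== SOURCE A (Python) =====
-- def deleteGreatestValue(grid):
--     """
--     :type grid: List[List[int]]
--     :rtype: int
--     """
--     count = 0
--     while grid[0]:
--         s = set()
--         for arr in grid:
--             s.add(max(arr))
--             arr.remove(max(arr))
--         count += max(s)
--     return count
-- ===== SOURCE B (Python) =====
-- def deleteGreatestValue(grid):
--     """
--     :type grid: List[List[int]]
--     :rtype: int
--     """
--     rows = [sorted(row, reverse=True) for row in grid]
--     total = 0
--     for j in range(len(rows[0])):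
--         total += max(row[j] for row in rows)
--     return total
-- ===== Notes on version B (the rewrite author's own statement) =====
-- stated objective: faster
-- what changed: Instead of repeatedly scanning every row for its max and removing it (a quadratic delete loop), B sorts each row descending once and sums the maximum over rows at each column index; Pre_ excludes the inputs where A raises (empty grid, or a row shorter than the first row).
import Mathlib
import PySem

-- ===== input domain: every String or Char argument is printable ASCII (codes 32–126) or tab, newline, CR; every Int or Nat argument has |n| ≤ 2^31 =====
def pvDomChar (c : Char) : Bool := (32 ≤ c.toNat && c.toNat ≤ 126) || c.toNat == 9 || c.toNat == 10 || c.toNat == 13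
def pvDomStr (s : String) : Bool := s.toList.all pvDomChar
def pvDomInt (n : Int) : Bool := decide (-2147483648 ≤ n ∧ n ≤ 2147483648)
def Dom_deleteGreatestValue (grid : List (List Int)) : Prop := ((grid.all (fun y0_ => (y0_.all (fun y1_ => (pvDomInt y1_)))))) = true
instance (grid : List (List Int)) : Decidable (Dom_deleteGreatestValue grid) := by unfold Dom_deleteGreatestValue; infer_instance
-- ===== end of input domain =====

-- B replaces A's repeated max-and-remove sweeps by sorting each row descending once and summing
-- per-column maxima (objective: faster, asymptotic). A mutates the rows of its argument in place;
-- the equivalence proved here is about the RETURN value only (B does not mutate).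


-- ===== PORT A =====
-- one pass of the for-loop body: for arr in grid: s.add(max(arr)); arr.remove(max(arr))
-- (none = the ValueError of max([]) on an empty row)
def pvStepA : List (List Int) → PySem.Set Int → Option (PySem.Set Int × List (List Int))
  | [], s => some (s, [])
  | arr :: rest, s =>
    match PySem.List.max? arr (fun x => x) with
    | none => none
    | some m =>
      match PySem.List.remove? arr m with
      | none => none
      | some arr' =>
        match pvStepA rest (PySem.Set.add s m) with
        | none => none
        | some (s', g) => some (s', arr' :: g)

-- the while loop; fuel only makes the recursion structural (grid[0] shrinks by one per
-- iteration, so (grid[0].length + 1) fuel is never exhausted); none = an exception of A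
def pvLoopA : Nat → List (List Int) → Int → Option Int
  | 0, _, _ => none
  | fuel + 1, grid, count =>
    match PySem.List.pyGet? grid 0 with
    | none => none                        -- grid[0] raises IndexError on an empty grid
    | some r0 =>
      if r0 = [] then some count
      else
        match pvStepA grid PySem.Set.empty with
        | none => none
        | some (s, g) =>
          match PySem.List.max? s (fun x => x) with
          | none => none
          | some m => pvLoopA fuel g (count + m)

def deleteGreatestValue (grid : List (List Int)) : Int :=
  (pvLoopA ((grid.headD []).length + 1) grid 0).getD 0

-- ===== PORT B =====
-- rows = [sorted(row, reverse=True) for row in grid]; for j in range(len(rows[0])): total += max(row[j] for row in rows)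
-- (defaults 0 in headD/pyGetD/getD are reached only where the Python raises, i.e. outside Pre_)
def deleteGreatestValue_alt (grid : List (List Int)) : Int :=
  let rows := grid.map (fun r => PySem.List.sorted r (fun x => x) true)
  (PySem.List.pyRange 0 ((rows.headD []).length : Int) 1).foldl
    (fun total j =>
      total + (PySem.List.max? (rows.map (fun row => PySem.List.pyGetD row j 0)) (fun x => x)).getD 0)
    0

-- ===== PRECONDITION & SPEC =====
-- Pre_ excludes exactly the inputs where A raises: the empty grid (grid[0] is an IndexError)
-- and grids with a row shorter than the first row (max of an emptied row is a ValueError).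
def Pre_deleteGreatestValue (grid : List (List Int)) : Prop :=
  grid ≠ [] ∧ ∀ r ∈ grid, (grid.headD []).length ≤ r.length
instance (grid : List (List Int)) : Decidable (Pre_deleteGreatestValue grid) := by
  unfold Pre_deleteGreatestValue; infer_instance
def pvWitness_deleteGreatestValue : List (List Int) := [[1, 2, 4], [3, 3, 1]]

def Spec_deleteGreatestValue (grid : List (List Int)) (out : Int) : Prop := out = deleteGreatestValue_alt grid
instance (grid : List (List Int)) (out : Int) : Decidable (Spec_deleteGreatestValue grid out) := by unfold Spec_deleteGreatestValue; infer_instance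

-- ===== CLAIM (what is proved, stated in full; the proofs are below) =====
def Claim_equal_deleteGreatestValue : Prop := ∀ (grid : List (List Int)), Dom_deleteGreatestValue grid → Pre_deleteGreatestValue grid → Spec_deleteGreatestValue grid (deleteGreatestValue grid)

-- ===== LEMMAS AND PROOFS =====

-- descending sort of the row, the object both sides are really about
def pvSd (r : List Int) : List Int := PySem.List.sorted r (fun x => x) true

-- max over column j (0-based) of the sorted rows
def pvM (rows : List (List Int)) (j : Nat) : Int :=
  (PySem.List.max? (rows.map (fun row => PySem.List.pyGetD row (j : Int) 0)) (fun x => x)).getD 0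

lemma pvSd_rev_eq_of_perm_of_pairwise (xs ys : List Int) (h : ys.Perm xs)
    (hp : ys.Pairwise (fun a b => b ≤ a)) : pvSd xs = ys := by
  refine List.Perm.eq_of_pairwise (fun a b _ _ h1 h2 => le_antisymm h2 h1) ?_ hp
    ((PySem.List.sorted_perm xs _ true).trans h.symm)
  exact PySem.List.sorted_pairwise_rev xs _

-- the per-row fact: on a nonempty row, max(arr) is the head of the descending sort,
-- and removing it leaves a row whose descending sort is the tail
lemma pvRow_step (r : List Int) (hr : r ≠ []) :
    ∃ m t, pvSd r = m :: t ∧ PySem.List.max? r (fun x => x) = some m ∧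
      PySem.List.remove? r m = some (r.erase m) ∧ pvSd (r.erase m) = t := by
  have hsd : pvSd r ≠ [] := by
    simpa [pvSd, PySem.List.sorted_eq_nil_iff] using hr
  obtain ⟨m, t, hmt⟩ : ∃ m t, pvSd r = m :: t := by
    cases h : pvSd r with
    | nil => exact absurd h hsd
    | cons a b => exact ⟨a, b, rfl⟩
  have hmax : ∃ m', PySem.List.max? r (fun x => x) = some m' := by
    cases h : PySem.List.max? r (fun x => x) with
    | none => exact absurd ((PySem.List.max?_eq_none_iff r _).mp h) hr
    | some m' => exact ⟨m', rfl⟩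
  obtain ⟨m', hm'⟩ := hmax
  have hmem' : m' ∈ r := PySem.List.max?_mem hm'
  have hmemm : m ∈ r := by
    have : m ∈ pvSd r := by simp [hmt]
    simpa [pvSd, PySem.List.mem_sorted] using this
  have hme : m' = m := le_antisymm
    (PySem.List.key_head_sorted_rev_ge r (fun x => x) hmt m' hmem')
    (PySem.List.max?_isMax hm' m hmemm)
  subst hme
  refine ⟨m', t, hmt, hm', PySem.List.remove?_eq_some_erase r m' hmemm, ?_⟩
  have hperm : (r.erase m').Perm t := by
    have h1 : r.Perm (m' :: t) := by
      have := (PySem.List.sorted_perm r (fun x => x) true)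
      rw [pvSd] at hmt; rw [hmt] at this; exact this.symm
    have := h1.erase m'
    simpa using this
  have hpt : t.Pairwise (fun a b => b ≤ a) := by
    have := PySem.List.sorted_pairwise_rev r (fun x => x)
    rw [← pvSd, hmt] at this
    exact this.of_cons
  exact pvSd_rev_eq_of_perm_of_pairwise _ _ hperm.symm hpt

-- pvStepA over a grid of nonempty rows: collects exactly the heads of the sorted rows
-- into the set, and the new grid's sorted rows are the tails
lemma pvStepA_spec (grid : List (List Int)) (s0 : PySem.Set Int)
    (h : ∀ r ∈ grid, r ≠ []) :
    ∃ s g, pvStepA grid s0 = some (s, g) ∧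
      (∀ x, x ∈ s ↔ x ∈ s0 ∨ x ∈ grid.map (fun r => (pvSd r).headD 0)) ∧
      g.map pvSd = (grid.map pvSd).map List.tail ∧
      g.map List.length = grid.map (fun r => r.length - 1) := by
  induction grid generalizing s0 with
  | nil => exact ⟨s0, [], rfl, by simp, by simp, by simp⟩
  | cons r rest ih =>
    obtain ⟨m, t, hmt, hmax, hrem, herase⟩ := pvRow_step r (h r (by simp))
    obtain ⟨s, g, hstep, hmem, hsd, hlen⟩ := ih (PySem.Set.add s0 m) (fun r hr => h r (by simp [hr]))
    refine ⟨s, r.erase m :: g, ?_, ?_, ?_, ?_⟩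
    · simp [pvStepA, hmax, hrem, hstep]
    · intro x
      rw [hmem x, PySem.Set.mem_add]
      simp [hmt]; tauto
    · simp [hsd, herase, hmt]
    · have : (r.erase m).length = r.length - 1 :=
        List.length_erase_of_mem (by
          have : m ∈ pvSd r := by simp [hmt]
          simpa [pvSd, PySem.List.mem_sorted] using this)
      simp [hlen, this]
  
-- two nonempty Int lists with the same membership have the same max? value
lemma pvMax_eq_of_mem_iff (xs ys : List Int) (hne : xs ≠ [])
    (h : ∀ x, x ∈ xs ↔ x ∈ ys) :
    PySem.List.max? xs (fun x => x) = PySem.List.max? ys (fun x => x) := by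
  have hys : ys ≠ [] := by
    intro hy; subst hy
    cases xs with
    | nil => exact hne rfl
    | cons a l => exact absurd ((h a).mp (by simp)) (by simp)
  obtain ⟨mx, hmx⟩ : ∃ m, PySem.List.max? xs (fun x => x) = some m := by
    cases hh : PySem.List.max? xs (fun x => x) with
    | none => exact absurd ((PySem.List.max?_eq_none_iff xs _).mp hh) hne
    | some m => exact ⟨m, rfl⟩
  obtain ⟨my, hmy⟩ : ∃ m, PySem.List.max? ys (fun x => x) = some m := by
    cases hh : PySem.List.max? ys (fun x => x) with
    | none => exact absurd ((PySem.List.max?_eq_none_iff ys _).mp hh) hys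
    | some m => exact ⟨m, rfl⟩
  have : mx = my := le_antisymm
    (PySem.List.max?_isMax hmy mx ((h mx).mp (PySem.List.max?_mem hmx)))
    (PySem.List.max?_isMax hmx my ((h my).mpr (PySem.List.max?_mem hmy)))
  rw [hmx, hmy, this]

lemma pvGetD_tail (r : List Int) (hr : r ≠ []) (j : Nat) :
    PySem.List.pyGetD r.tail (j : Int) 0 = PySem.List.pyGetD r ((j + 1 : Nat) : Int) 0 := by
  cases r with
  | nil => exact absurd rfl hr
  | cons a l =>
    rw [PySem.List.pyGetD_natCast, PySem.List.pyGetD_natCast]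
    simp

-- the invariant of A's while loop, against the column sums of the sorted rows
lemma pvLoopA_eq (k : Nat) : ∀ (grid : List (List Int)) (count : Int),
    grid ≠ [] → (grid.headD []).length = k → (∀ r ∈ grid, k ≤ r.length) →
    pvLoopA (k + 1) grid count =
      some (count + ((List.range k).map (pvM (grid.map pvSd))).sum) := by
  induction k with
  | zero =>
    intro grid count hne hk _
    obtain ⟨r0, rest, rfl⟩ : ∃ r0 rest, grid = r0 :: rest := by
      cases grid with
      | nil => exact absurd rfl hne
      | cons a l => exact ⟨a, l, rfl⟩
    have hr0 : r0 = [] := by simpa using hk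
    simp [pvLoopA, PySem.List.pyGet?, PySem.List.pyIdx?, hr0]
  | succ k ih =>
    intro grid count hne hk hlen
    obtain ⟨r0, rest, rfl⟩ : ∃ r0 rest, grid = r0 :: rest := by
      cases grid with
      | nil => exact absurd rfl hne
      | cons a l => exact ⟨a, l, rfl⟩
    have hr0ne : r0 ≠ [] := by
      intro h; rw [h] at hk; simp at hk
    have hallne : ∀ r ∈ r0 :: rest, r ≠ [] := by
      intro r hr hrnil
      have := hlen r hr
      rw [hrnil] at this; simp at this
    obtain ⟨s, g, hstep, hmem, hsd, hglen⟩ := pvStepA_spec (r0 :: rest) PySem.Set.empty hallne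
    -- max over the set s equals pvM (sorted rows) 0
    have hheads : ∀ x, x ∈ s ↔ x ∈ (r0 :: rest).map (fun r => (pvSd r).headD 0) := by
      intro x; rw [hmem x]; simp [PySem.Set.empty]
    have hheadD : ((r0 :: rest).map (fun r => (pvSd r).headD 0))
        = ((r0 :: rest).map pvSd).map (fun row => PySem.List.pyGetD row ((0 : Nat) : Int) 0) := by
      simp only [List.map_map]
      refine List.map_congr_left ?_
      intro r hr
      obtain ⟨m, t, hmt, _, _, _⟩ := pvRow_step r (hallne r hr)
      simp [Function.comp, hmt]
    have hsne : s ≠ [] := by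
      intro h0
      have := (hheads ((pvSd r0).headD 0)).mpr (by simp)
      rw [h0] at this; simp at this
    have hmaxeq : PySem.List.max? s (fun x => x)
        = some (pvM ((r0 :: rest).map pvSd) 0) := by
      have := pvMax_eq_of_mem_iff s (((r0 :: rest).map pvSd).map (fun row => PySem.List.pyGetD row ((0 : Nat) : Int) 0)) hsne
        (by intro x; rw [hheads x, hheadD])
      rw [this]
      unfold pvM
      cases hh : PySem.List.max? (((r0 :: rest).map pvSd).map (fun row => PySem.List.pyGetD row ((0:Nat) : Int) 0)) (fun x => x) with
      | none =>
        rw [PySem.List.max?_eq_none_iff] at hh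
        simp at hh
      | some m => simp
    -- the recursive call via ih
    have hgne : g ≠ [] := by
      intro h0; rw [h0] at hsd
      simp at hsd
    have hk' : r0.length = k + 1 := by simpa using hk
    have hghead : (g.headD []).length = k := by
      cases g with
      | nil => exact absurd rfl hgne
      | cons a l =>
        have h1 : a.length = r0.length - 1 := by
          simpa using congrArg (fun l => l.headD 0) hglen
        show a.length = k
        omega
    have hglen' : ∀ r ∈ g, k ≤ r.length := by
      intro r hr
      have hm : r.length ∈ g.map List.length := List.mem_map_of_mem hr
      rw [hglen, List.mem_map] at hm
      obtain ⟨a, ha, hae⟩ := hm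
      have := hlen a ha
      omega
    have hrec := ih g (count + pvM ((r0 :: rest).map pvSd) 0) hgne hghead hglen'
    -- shift: pvM (g.map pvSd) j = pvM ((r0::rest).map pvSd) (j+1)
    have hshift : ∀ j : Nat, pvM (g.map pvSd) j = pvM ((r0 :: rest).map pvSd) (j + 1) := by
      intro j
      unfold pvM
      rw [hsd]
      congr 1
      simp only [List.map_map]
      refine congrArg (fun l => PySem.List.max? l (fun x : Int => x)) ?_
      refine List.map_congr_left ?_
      intro r hr
      have hsdne : pvSd r ≠ [] := by
        simpa [pvSd, PySem.List.sorted_eq_nil_iff] using hallne r hr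
      simpa [Function.comp] using pvGetD_tail (pvSd r) hsdne j
    have hsum : ((List.range (k + 1)).map (pvM ((r0 :: rest).map pvSd))).sum
        = pvM ((r0 :: rest).map pvSd) 0 + ((List.range k).map (pvM (g.map pvSd))).sum := by
      rw [List.range_succ_eq_map]
      simp only [List.map_cons, List.map_map, List.sum_cons]
      congr 1
      refine congrArg List.sum ?_
      refine List.map_congr_left ?_
      intro j _
      simp [Function.comp, hshift j]
    have hget : PySem.List.pyGet? (r0 :: rest) 0 = some r0 := by
      simp [PySem.List.pyGet?, PySem.List.pyIdx?]
    rw [pvLoopA, hget]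
    simp only [if_neg hr0ne, hstep, hmaxeq]
    rw [hrec, hsum]
    ring_nf

-- B's fold over range equals the same column sums
lemma pvAlt_eq (grid : List (List Int)) :
    deleteGreatestValue_alt grid =
      ((List.range ((grid.map pvSd).headD []).length).map (pvM (grid.map pvSd))).sum := by
  show (PySem.List.pyRange 0 (((grid.map pvSd).headD []).length : Int) 1).foldl
      (fun total j =>
        total + (PySem.List.max? ((grid.map pvSd).map (fun row => PySem.List.pyGetD row j 0)) (fun x => x)).getD 0)
      0 = _
  rw [PySem.List.pyRange_zero_natCast, List.foldl_map]
  rw [PySem.List.foldl_add, zero_add]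
  congr 1

lemma pvSd_head_len (grid : List (List Int)) (hne : grid ≠ []) :
    ((grid.map pvSd).headD []).length = (grid.headD []).length := by
  cases grid with
  | nil => exact absurd rfl hne
  | cons r rest => simp [pvSd, PySem.List.length_sorted]

-- ===== VERDICT (by name: the statement is the Claim_ definition above) =====
theorem deleteGreatestValue_spec : Claim_equal_deleteGreatestValue := by
  intro grid _ hpre
  obtain ⟨hne, hlen⟩ := hpre
  unfold Spec_deleteGreatestValue deleteGreatestValue
  rw [pvLoopA_eq ((grid.headD []).length) grid 0 hne rfl hlen]
  rw [pvAlt_eq, pvSd_head_len grid hne]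
  simp
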